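-- pv_equiv track=rewrite | github.com/aws-samples/sample-agentic-value-accelerator | applications/reference_implementations/market-surveillance/seeding_scripts/db_ops/db_dump.py | categorize_tables
-- ===== SOURCE A (Python) =====
-- def categorize_tables(tables: list[str]) -> dict[str, list[str]]:
--     """Group tables by category (prefix)."""
--     # Use lowercase prefixes to match PostgreSQL table names
--     categories = {
--         "ref_": [],
--         "dim_": [],
--         "fact_": [],
--         "fr_": [],
--         "Other": [],
--     }
--
--     for table in tables:
--         matched = False
--         table_lower = table.lower()
--         for prefix in ["ref_", "dim_", "fact_", "fr_"]:
--             if table_lower.startswith(prefix):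
--                 categories[prefix].append(table)
--                 matched = True
--                 break
--         if not matched:
--             categories["Other"].append(table)
--
--     return {k: v for k, v in categories.items() if v}
-- ===== SOURCE B (Python) =====
-- CATEGORIES = ["ref_", "dim_", "fact_", "fr_", "Other"]
--
--
-- def _category(table):
--     table_lower = table.lower()
--     for prefix in ["ref_", "dim_", "fact_", "fr_"]:
--         if table_lower.startswith(prefix):
--             return prefix
--     return "Other"
--
--
-- def categorize_tables(tables):
--     """Group tables by category (prefix): per-category collection pass."""
--     result = {}
--     for category in CATEGORIES:
--         group = [t for t in tables if _category(t) == category]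
--         if group:
--             result[category] = group
--     return result
-- ===== Notes on version B (the rewrite author's own statement) =====
-- stated objective: alternative
-- what changed: Inverted the traversal: instead of one pass over tables appending into a pre-seeded 5-key dict and filtering empties afterwards, B classifies each table with a helper and builds the result per category, collecting each category's group in its own pass and inserting only non-empty groups.
import Mathlib
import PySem

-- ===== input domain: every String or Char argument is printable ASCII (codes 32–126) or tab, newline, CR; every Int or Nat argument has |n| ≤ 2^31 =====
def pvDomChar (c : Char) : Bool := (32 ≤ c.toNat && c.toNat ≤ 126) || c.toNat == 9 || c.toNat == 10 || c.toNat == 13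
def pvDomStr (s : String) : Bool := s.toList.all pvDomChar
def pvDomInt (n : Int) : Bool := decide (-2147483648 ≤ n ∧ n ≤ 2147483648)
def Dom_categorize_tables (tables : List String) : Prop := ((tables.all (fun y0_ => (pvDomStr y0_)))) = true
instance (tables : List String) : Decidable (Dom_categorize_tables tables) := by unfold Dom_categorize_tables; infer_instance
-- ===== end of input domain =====

-- B inverts the traversal (per-category collection via a classify helper) instead of A's
-- single pass appending into a pre-seeded dict; objective: alternative decomposition, same cost.

-- ===== PORT A =====
-- one table's step of A's loop: try the four prefixes in order, else "Other"
def pvStepA (d : PySem.Dict String (List String)) (table : String) : PySem.Dict String (List String) :=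
  let tl := PySem.Str.lower table
  if PySem.Str.startswith tl "ref_" then d.modify "ref_" [] (· ++ [table])
  else if PySem.Str.startswith tl "dim_" then d.modify "dim_" [] (· ++ [table])
  else if PySem.Str.startswith tl "fact_" then d.modify "fact_" [] (· ++ [table])
  else if PySem.Str.startswith tl "fr_" then d.modify "fr_" [] (· ++ [table])
  else d.modify "Other" [] (· ++ [table])

def categorize_tables (tables : List String) : List (String × List String) :=
  let categories : PySem.Dict String (List String) :=
    PySem.Dict.ofList [("ref_", []), ("dim_", []), ("fact_", []), ("fr_", []), ("Other", [])]
  let categories := tables.foldl pvStepA categories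
  -- final dict comprehension {k: v for k, v in categories.items() if v}
  categories.items.filter (fun kv => !kv.2.isEmpty)

-- ===== PORT B =====
-- B's helper: the category of one table (first matching prefix, else "Other")
def pvCategory (table : String) : String :=
  let tl := PySem.Str.lower table
  match ["ref_", "dim_", "fact_", "fr_"].find? (fun p => PySem.Str.startswith tl p) with
  | some p => p
  | none => "Other"

def categorize_tables_alt (tables : List String) : List (String × List String) :=
  ["ref_", "dim_", "fact_", "fr_", "Other"].filterMap (fun c =>
    let group := tables.filter (fun t => pvCategory t == c)
    if group.isEmpty then none else some (c, group))

-- ===== PRECONDITION & SPEC =====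
def Spec_categorize_tables (tables : List String) (out : List (String × List String)) : Prop := out = categorize_tables_alt tables
instance (tables : List String) (out : List (String × List String)) : Decidable (Spec_categorize_tables tables out) := by unfold Spec_categorize_tables; infer_instance

-- ===== CLAIM (what is proved, stated in full; the proofs are below) =====
def Claim_equal_categorize_tables : Prop := ∀ (tables : List String), Dom_categorize_tables tables → Spec_categorize_tables tables (categorize_tables tables)

-- ===== LEMMAS AND PROOFS =====

-- the A-loop over any 5-entry dict of this fixed shape appends each table to its category's list
theorem pv_fold_eq (tables : List String) (r d f fr o : List String) :
    tables.foldl pvStepA (PySem.Dict.mk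
      [("ref_", r), ("dim_", d), ("fact_", f), ("fr_", fr), ("Other", o)])
    = PySem.Dict.mk
      [("ref_",  r  ++ tables.filter (fun t => pvCategory t == "ref_")),
       ("dim_",  d  ++ tables.filter (fun t => pvCategory t == "dim_")),
       ("fact_", f  ++ tables.filter (fun t => pvCategory t == "fact_")),
       ("fr_",   fr ++ tables.filter (fun t => pvCategory t == "fr_")),
       ("Other", o  ++ tables.filter (fun t => pvCategory t == "Other"))] := by
  induction tables generalizing r d f fr o with
  | nil => simp
  | cons t rest ih =>
    simp only [List.foldl_cons, List.filter_cons]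
    by_cases h1 : PySem.Chars.startswith (PySem.Chars.lower t.toList) (['r','e','f','_'] : List Char) = true
    · have hc : pvCategory t = "ref_" := by simp [pvCategory, List.find?, h1]
      have hstep : pvStepA (PySem.Dict.mk
          [("ref_", r), ("dim_", d), ("fact_", f), ("fr_", fr), ("Other", o)]) t
          = PySem.Dict.mk
          [("ref_", r ++ [t]), ("dim_", d), ("fact_", f), ("fr_", fr), ("Other", o)] := by
        simp [pvStepA, h1, PySem.Dict.modify, PySem.Dict.get?, PySem.Dict.insert,
              PySem.Dict.contains, PySem.Dict.getD]
      rw [hstep, ih]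
      simp [hc]
    · by_cases h2 : PySem.Chars.startswith (PySem.Chars.lower t.toList) (['d','i','m','_'] : List Char) = true
      · have hc : pvCategory t = "dim_" := by simp [pvCategory, List.find?, h1, h2]
        have hstep : pvStepA (PySem.Dict.mk
            [("ref_", r), ("dim_", d), ("fact_", f), ("fr_", fr), ("Other", o)]) t
            = PySem.Dict.mk
            [("ref_", r), ("dim_", d ++ [t]), ("fact_", f), ("fr_", fr), ("Other", o)] := by
          simp [pvStepA, h1, h2, PySem.Dict.modify, PySem.Dict.get?, PySem.Dict.insert,
                PySem.Dict.contains, PySem.Dict.getD]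
        rw [hstep, ih]
        simp [hc]
      · by_cases h3 : PySem.Chars.startswith (PySem.Chars.lower t.toList) (['f','a','c','t','_'] : List Char) = true
        · have hc : pvCategory t = "fact_" := by simp [pvCategory, List.find?, h1, h2, h3]
          have hstep : pvStepA (PySem.Dict.mk
              [("ref_", r), ("dim_", d), ("fact_", f), ("fr_", fr), ("Other", o)]) t
              = PySem.Dict.mk
              [("ref_", r), ("dim_", d), ("fact_", f ++ [t]), ("fr_", fr), ("Other", o)] := by
            simp [pvStepA, h1, h2, h3, PySem.Dict.modify, PySem.Dict.get?, PySem.Dict.insert,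
                  PySem.Dict.contains, PySem.Dict.getD]
          rw [hstep, ih]
          simp [hc]
        · by_cases h4 : PySem.Chars.startswith (PySem.Chars.lower t.toList) (['f','r','_'] : List Char) = true
          · have hc : pvCategory t = "fr_" := by simp [pvCategory, List.find?, h1, h2, h3, h4]
            have hstep : pvStepA (PySem.Dict.mk
                [("ref_", r), ("dim_", d), ("fact_", f), ("fr_", fr), ("Other", o)]) t
                = PySem.Dict.mk
                [("ref_", r), ("dim_", d), ("fact_", f), ("fr_", fr ++ [t]), ("Other", o)] := by
              simp [pvStepA, h1, h2, h3, h4, PySem.Dict.modify, PySem.Dict.get?,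
                    PySem.Dict.insert, PySem.Dict.contains, PySem.Dict.getD]
            rw [hstep, ih]
            simp [hc]
          · have hc : pvCategory t = "Other" := by simp [pvCategory, List.find?, h1, h2, h3, h4]
            have hstep : pvStepA (PySem.Dict.mk
                [("ref_", r), ("dim_", d), ("fact_", f), ("fr_", fr), ("Other", o)]) t
                = PySem.Dict.mk
                [("ref_", r), ("dim_", d), ("fact_", f), ("fr_", fr), ("Other", o ++ [t])] := by
              simp [pvStepA, h1, h2, h3, h4, PySem.Dict.modify, PySem.Dict.get?,
                    PySem.Dict.insert, PySem.Dict.contains, PySem.Dict.getD]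
            rw [hstep, ih]
            simp [hc]

-- the final dict comprehension over a literal 5-key dict equals B's per-category filterMap
theorem pv_final_eq (g : String → List String) :
    ((PySem.Dict.mk [("ref_", g "ref_"), ("dim_", g "dim_"), ("fact_", g "fact_"),
        ("fr_", g "fr_"), ("Other", g "Other")]).items).filter (fun kv => !kv.2.isEmpty)
    = ["ref_", "dim_", "fact_", "fr_", "Other"].filterMap (fun c =>
        let group := g c
        if group.isEmpty then none else some (c, group)) := by
  simp only [List.filter, List.filterMap]
  by_cases h1 : (g "ref_").isEmpty <;> by_cases h2 : (g "dim_").isEmpty <;>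
    by_cases h3 : (g "fact_").isEmpty <;> by_cases h4 : (g "fr_").isEmpty <;>
    by_cases h5 : (g "Other").isEmpty <;> simp [h1, h2, h3, h4, h5]

-- ===== VERDICT (by name: the statement is the Claim_ definition above) =====
theorem categorize_tables_spec : Claim_equal_categorize_tables := by
  intro tables _
  show categorize_tables tables = categorize_tables_alt tables
  have hinit : PySem.Dict.ofList
      [("ref_", ([] : List String)), ("dim_", []), ("fact_", []), ("fr_", []), ("Other", [])]
      = PySem.Dict.mk [("ref_", []), ("dim_", []), ("fact_", []), ("fr_", []), ("Other", [])] := rfl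
  simp only [categorize_tables, categorize_tables_alt, hinit, pv_fold_eq, List.nil_append]
  exact pv_final_eq (fun c => tables.filter (fun t => pvCategory t == c))
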